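/-
  THE CONTRACTS OF THE DESCRIPTOR READERS (design/CONTRACTS.md entries 11, 12, 16, 17): `DGifGetScreenDesc`, `DGifOpen`,
  `DGifGetImageHeader`, `DGifGetImageDesc`: the functions that read headers AND move ownership (design/INVARIANTS.md §2.1).
  Vocabulary: Gif/Spec/Common.lean (+ CommonMore.lean §8); the steps of the forest: Gif/Spec/ForestCarry.lean.

  EVERY CONTRACT HERE IS FOREST-LEVEL: pre `Env H rest frames F R u`, post `∃ H' F', Back2 H rest frames R u v H' F' ∧ …` — A heap at
  the place of `H`, A forest, for which the heap's invariant and the state invariant hold; which components of the forest may differ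
  from `F`'s is said by `Forest.SameBut…`. OUT OF MEMORY IS REACHABLE at every allocation (a 4 MB heap that never re-uses): every NULL
  arm is an ordinary path and ends in the same `Back2`. The footprint is the heap's region and its shadow (plus what is named):
  after the call a caller re-reads everything from gif, with the post's invariant.

  FRAMES (design/FRAMES.gif.txt):
      function               own                        callees (frame)                                                    frame
      DGifGetScreenDesc      6 pushes + sub 72 = 120    DGifGetWord (272), InternalRead (176), GifMakeMapObject (160), …   120 + 8 + 272 = 400
      DGifOpen               6 pushes + sub 72 = 120    DGifGetScreenDesc (400), calloc (96), InternalRead (176), …        120 + 8 + 400 = 528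
      DGifGetImageHeader     6 pushes + sub 88 = 136    DGifSetupDecompress (304), DGifGetWord (272), …                    136 + 8 + 304 = 448
      DGifGetImageDesc       4 pushes + sub 8 = 40      DGifGetImageHeader (448), openbsd_reallocarray (144), …             40 + 8 + 448 = 496
-/
import Gif.Spec.CommonMore
import Gif.Spec.Reader
namespace Gif.Spec
open X86 X86.User Asan ProgX.Base ProgX.Base.Spec

/-- **`DGifGetScreenDesc(rdi = gif)`** (dgif_lib.c:248-310; a PROTECTED frame: `Buf[3]`): two words, three bytes, and — if the flag
byte says so — the global colour map: `GifMakeMapObject(1 << BitsPerPixel, NULL)` (2 … 256 colours), `SortFlag`, one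
InternalRead of 3 bytes per colour. Pre: `F.scm = none` (it runs once, from DGifOpen: l.268 then passes NULL to GifFreeMapObject,
l.280 and l.301 overwrite a NULL field). Post: `F'` differs from `F` in `scm` only; GIF_ERROR: `F'.scm = none` (what DGifOpen's
`free(Private); free(GifFile)` needs: nothing else is owned). -/
def DGifGetScreenDesc.spec (H : Heap) (rest : List Obj) (frames : List (Nat × FrameLayout)) (F : Forest) (R : Rd) : Spec where
  pre u :=
    Env H rest frames F R u ∧
    (u.reg .rdi).toNat = F.gif ∧
    F.scm = none
  post u v :=
    ∃ H' F', Back2 H rest frames R u v H' F' ∧ F.SameButScm F' ∧ IsBool v ∧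
      ((v.reg .rax).toNat = 0 → F'.scm = none)
  frame := 400
  writes _ :=
    [⟨0x800000, 0x1000020⟩,
     ⟨R.cur, R.cur + 8⟩]

@[vspec] theorem DGifGetScreenDesc.spec_frame (H : Heap) (rest : List Obj) (frames : List (Nat × FrameLayout)) (F : Forest)
    (R : Rd) : (DGifGetScreenDesc.spec H rest frames F R).frame = 400 := id rfl

@[vspec] theorem DGifGetScreenDesc.spec_writes (H : Heap) (rest : List Obj) (frames : List (Nat × FrameLayout)) (F : Forest)
    (R : Rd) (u : State) :
    (DGifGetScreenDesc.spec H rest frames F R).writes u =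
      [⟨0x800000, 0x1000020⟩,
       ⟨R.cur, R.cur + 8⟩] := id rfl

/-- **`DGifOpen(rdi = userData, rsi = readFunc, rdx = Error)`** (dgif_lib.c:167-242; a PROTECTED frame: `Buf[7]`): `malloc` + `memset`
of the GifFileType, `calloc` + `memset` of the private object, the six stores that make the reader (`Private`, `FileHandle`,
`File = NULL`, `FileState = FILE_STATE_READ`, `Read = readFunc`, `UserData = userData`), six bytes of stamp, `strncmp` with the
registered literal "GIFVER", DGifGetScreenDesc. Every failure frees what was allocated (pv, then gif) and returns NULL.
There is NO forest at the entry: pre = the heap's `HeapPre`, the context, the cursor and the constants as they are in memory,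
`userData = &cursor`, `readFunc = &mem_read`. Post: A heap `H'` with its invariant; NULL, or `rax = F'.gif` for a forest `F'` with
the state invariant and nothing but (possibly) the screen's colour map besides gif and pv (design point P2; ALL LZW fields are 0:
`LZOK` is FALSE here). -/
def DGifOpen.spec (H : Heap) (rest : List Obj) (frames : List (Nat × FrameLayout)) (R : Rd) : Spec where
  pre u :=
    HeapPre H rest frames u ∧
    Ctx rest frames R ∧
    CursorOK R u.mem ∧
    Consts u.mem ∧
    (u.reg .rdi).toNat = R.cur ∧
    (u.reg .rsi).toNat = memReadEntry ∧
    ErrPtr H rest frames R (u.reg .rdx).toNat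
  post u v :=
    ∃ H', SameRegion H H' ∧
      HeapInv H' rest frames ((u.reg .rsp).toNat + 8) v.mem ∧
      CursorOK R v.mem ∧ Consts v.mem ∧ rem R v.mem ≤ rem R u.mem ∧
      ((v.reg .rax).toNat = 0 ∨
        ∃ F', (v.reg .rax).toNat = F'.gif ∧ GifOK H' F' R v.mem ∧ F'.icm = none ∧ F'.saved = none ∧ F'.pend = none)
  frame := 528
  writes u :=
    [⟨0x800000, 0x1000020⟩,
     ⟨(u.reg .rdx).toNat, (u.reg .rdx).toNat + 4⟩,
     ⟨R.cur, R.cur + 8⟩]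

@[vspec] theorem DGifOpen.spec_frame (H : Heap) (rest : List Obj) (frames : List (Nat × FrameLayout)) (R : Rd) :
    (DGifOpen.spec H rest frames R).frame = 528 := id rfl

@[vspec] theorem DGifOpen.spec_writes (H : Heap) (rest : List Obj) (frames : List (Nat × FrameLayout)) (R : Rd) (u : State) :
    (DGifOpen.spec H rest frames R).writes u =
      [⟨0x800000, 0x1000020⟩,
       ⟨(u.reg .rdx).toNat, (u.reg .rdx).toNat + 4⟩,
       ⟨R.cur, R.cur + 8⟩] := id rfl

/-- **`DGifGetImageHeader(rdi = gif)`** (dgif_lib.c:361-424; a PROTECTED frame: `Buf[3]`): four words into `gif.Image`, the flag byte,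
the free of the previous image's local map (`GifFreeMapObject(Image.ColorMap)`, the argument possibly NULL: F-1; the field is
nulled after each free), a new local map if the flag says so, `PixelCount`, then DGifSetupDecompress. Post: `F'` differs from `F`
in `icm` only (the previous map untouched — a word failed —, freed, or replaced by a fresh one); GIF_OK: **`LZOK`**. -/
def DGifGetImageHeader.spec (H : Heap) (rest : List Obj) (frames : List (Nat × FrameLayout)) (F : Forest) (R : Rd) : Spec where
  pre u :=
    Env H rest frames F R u ∧
    (u.reg .rdi).toNat = F.gif
  post u v :=
    ∃ H' F', Back2 H rest frames R u v H' F' ∧ F.SameButIcm F' ∧ IsBool v ∧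
      ((v.reg .rax).toNat = 1 → LZOK v.mem F.pv)
  frame := 448
  writes _ :=
    [⟨0x800000, 0x1000020⟩,
     ⟨R.cur, R.cur + 8⟩]

@[vspec] theorem DGifGetImageHeader.spec_frame (H : Heap) (rest : List Obj) (frames : List (Nat × FrameLayout)) (F : Forest)
    (R : Rd) : (DGifGetImageHeader.spec H rest frames F R).frame = 448 := id rfl

@[vspec] theorem DGifGetImageHeader.spec_writes (H : Heap) (rest : List Obj) (frames : List (Nat × FrameLayout)) (F : Forest)
    (R : Rd) (u : State) :
    (DGifGetImageHeader.spec H rest frames F R).writes u =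
      [⟨0x800000, 0x1000020⟩,
       ⟨R.cur, R.cur + 8⟩] := id rfl

/-- **`DGifGetImageDesc(rdi = gif)`** (dgif_lib.c:430-479): DGifGetImageHeader; the SavedImages array grows by one slot
(`reallocarray(SavedImages, ImageCount + 1, 56)` — in place, moved, or failed: the old array stays owned —, or the first
`malloc(56)`); `memcpy` of `gif.Image` into the new, UNCOUNTED slot; a deep copy of the local colour map
(`GifMakeMapObject(count, Colors)`; on NULL the slot's field is 0 and the function returns WITHOUT counting the slot:
`cap = length + 1`); the three other fields of the slot nulled; `ImageCount++`.
Post: `F'` differs from `F` in `icm` and `saved` only. GIF_OK: ONE MORE counted image, without raster and without extension list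
(design point IM; EX3), the images before it are the same; **`LZOK`**. GIF_ERROR: the same counted images. -/
def DGifGetImageDesc.spec (H : Heap) (rest : List Obj) (frames : List (Nat × FrameLayout)) (F : Forest) (R : Rd) : Spec where
  pre u :=
    Env H rest frames F R u ∧
    (u.reg .rdi).toNat = F.gif
  post u v :=
    ∃ H' F', Back2 H rest frames R u v H' F' ∧ F.SameButIcmSaved F' ∧ IsBool v ∧
      ((v.reg .rax).toNat = 1 →
        LZOK v.mem F.pv ∧ ∃ g, F'.imgs = F.imgs ++ [g] ∧ g.raster = none ∧ g.ext = none) ∧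
      ((v.reg .rax).toNat = 0 → F'.imgs = F.imgs)
  frame := 496
  writes _ :=
    [⟨0x800000, 0x1000020⟩,
     ⟨R.cur, R.cur + 8⟩]

@[vspec] theorem DGifGetImageDesc.spec_frame (H : Heap) (rest : List Obj) (frames : List (Nat × FrameLayout)) (F : Forest)
    (R : Rd) : (DGifGetImageDesc.spec H rest frames F R).frame = 496 := id rfl

@[vspec] theorem DGifGetImageDesc.spec_writes (H : Heap) (rest : List Obj) (frames : List (Nat × FrameLayout)) (F : Forest)
    (R : Rd) (u : State) :
    (DGifGetImageDesc.spec H rest frames F R).writes u =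
      [⟨0x800000, 0x1000020⟩,
       ⟨R.cur, R.cur + 8⟩] := id rfl

end Gif.Spec
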